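-- pv_equiv track=rewrite | github.com/Crystweb/goit-pc-hw-02 | task1_2.py | find_repeated_sequences_spacings
-- ===== SOURCE A (Python) =====
-- def find_repeated_sequences_spacings(ciphertext, sequence_length=3):
--     """
--     Знаходить повторювані послідовності символів та їх відстані у шифротексті.
--     """
--     spacings = []
--     seq_positions = {}
--     for i in range(len(ciphertext) - sequence_length +1):
--         seq = ciphertext[i:i+sequence_length]
--         if seq in seq_positions:
--             for pos in seq_positions[seq]:
--                 spacing = i - pos
--                 spacings.append(spacing)
--             seq_positions[seq].append(i)
--         else:
--             seq_positions[seq] = [i]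
--     return spacings
-- ===== SOURCE B (Python) =====
-- def find_repeated_sequences_spacings(ciphertext, sequence_length=3):
--     n = len(ciphertext) - sequence_length + 1
--     index = {}
--     for i in range(n):
--         index.setdefault(ciphertext[i:i+sequence_length], []).append(i)
--     return [i - pos
--             for i in range(n)
--             for pos in index[ciphertext[i:i+sequence_length]]
--             if pos < i]
-- ===== Notes on version B (the rewrite author's own statement) =====
-- stated objective: alternative
-- what changed: A interleaves dict construction and spacing emission in one incremental pass; B first builds the complete substring-to-positions index, then emits spacings in a second pass as a comprehension filtering earlier positions (pos < i).
import Mathlib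
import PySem

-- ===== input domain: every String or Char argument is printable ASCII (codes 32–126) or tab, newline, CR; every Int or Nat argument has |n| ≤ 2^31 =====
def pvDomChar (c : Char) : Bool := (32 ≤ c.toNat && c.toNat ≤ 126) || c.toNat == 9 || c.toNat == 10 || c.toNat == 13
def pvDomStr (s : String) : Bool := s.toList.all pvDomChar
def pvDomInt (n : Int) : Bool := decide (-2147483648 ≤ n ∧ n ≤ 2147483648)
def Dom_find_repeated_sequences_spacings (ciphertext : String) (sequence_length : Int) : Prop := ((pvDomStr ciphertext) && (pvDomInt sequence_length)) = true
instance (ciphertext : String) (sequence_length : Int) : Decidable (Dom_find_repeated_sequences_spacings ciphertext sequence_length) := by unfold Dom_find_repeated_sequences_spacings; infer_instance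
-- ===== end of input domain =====

-- B separates index construction from spacing emission: one pass builds the full
-- substring→positions index, a comprehension then emits i - pos for earlier positions;
-- objective: alternative decomposition (same asymptotic cost), return value identical.

-- ===== PORT A =====
-- single pass: incremental dict of positions, spacings appended as repeats are met
def find_repeated_sequences_spacings (ciphertext : String) (sequence_length : Int) : List Int :=
  (PySem.List.pyRange 0 ((ciphertext.length : Int) - sequence_length + 1) 1).foldl
    (fun (st : List Int × PySem.Dict String (List Int)) i =>
      let seq := PySem.Str.slice ciphertext (some i) (some (i + sequence_length))
      match st.2.get? seq with
      | some ps => (st.1 ++ ps.map (fun pos => i - pos), st.2.insert seq (ps ++ [i]))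
      | none => (st.1, st.2.insert seq [i]))
    ([], PySem.Dict.empty) |>.1

-- ===== PORT B =====
-- first pass: the full index (setdefault+append rendered as insert of getD ++ [i])
def pvIndexB (ciphertext : String) (sequence_length : Int) (n : Int) : PySem.Dict String (List Int) :=
  (PySem.List.pyRange 0 n 1).foldl
    (fun (d : PySem.Dict String (List Int)) i =>
      let seq := PySem.Str.slice ciphertext (some i) (some (i + sequence_length))
      d.insert seq (d.getD seq [] ++ [i]))
    PySem.Dict.empty

def find_repeated_sequences_spacings_alt (ciphertext : String) (sequence_length : Int) : List Int :=
  let n : Int := (ciphertext.length : Int) - sequence_length + 1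
  let index := pvIndexB ciphertext sequence_length n
  (PySem.List.pyRange 0 n 1).flatMap (fun i =>
    (((index.getD (PySem.Str.slice ciphertext (some i) (some (i + sequence_length))) []).filter
      (fun pos => pos < i)).map (fun pos => i - pos)))

-- ===== PRECONDITION & SPEC =====
def Spec_find_repeated_sequences_spacings (ciphertext : String) (sequence_length : Int) (out : List Int) : Prop := out = find_repeated_sequences_spacings_alt ciphertext sequence_length
instance (ciphertext : String) (sequence_length : Int) (out : List Int) : Decidable (Spec_find_repeated_sequences_spacings ciphertext sequence_length out) := by unfold Spec_find_repeated_sequences_spacings; infer_instance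

-- ===== CLAIM (what is proved, stated in full; the proofs are below) =====
def Claim_equal_find_repeated_sequences_spacings : Prop := ∀ (ciphertext : String) (sequence_length : Int), Dom_find_repeated_sequences_spacings ciphertext sequence_length → Spec_find_repeated_sequences_spacings ciphertext sequence_length (find_repeated_sequences_spacings ciphertext sequence_length)

-- ===== LEMMAS AND PROOFS =====

-- the substring starting at i
def pvSeq (c : String) (L i : Int) : String := PySem.Str.slice c (some i) (some (i + L))

theorem pvSeq_def (c : String) (L i : Int) :
    PySem.Str.slice c (some i) (some (i + L)) = pvSeq c L i := rfl

-- positions j in [0, m) whose substring equals s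
def pvP (c : String) (L m : Int) (s : String) : List Int :=
  (PySem.List.pyRange 0 m 1).filter (fun j => pvSeq c L j == s)

theorem pvP_succ (c : String) (L m : Int) (hm : 0 ≤ m) (s : String) :
    pvP c L (m + 1) s = pvP c L m s ++ (if pvSeq c L m = s then [m] else []) := by
  unfold pvP
  rw [PySem.List.pyRange_one_succ_right hm, List.filter_append]
  by_cases h : pvSeq c L m = s <;> simp [h]

theorem pvIndexB_succ (c : String) (L m : Int) (hm : 0 ≤ m) :
    pvIndexB c L (m + 1) = (pvIndexB c L m).insert (pvSeq c L m)
      ((pvIndexB c L m).getD (pvSeq c L m) [] ++ [m]) := by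
  unfold pvIndexB
  rw [PySem.List.pyRange_one_succ_right hm, List.foldl_append]
  rfl

-- dict invariant for B's index fold (and, as proven below, A's dict component)
theorem pvIndex_get? (c : String) (L m : Int) (hm : 0 ≤ m) (s : String) :
    (pvIndexB c L m).get? s = if pvP c L m s = [] then none else some (pvP c L m s) := by
  induction m, hm using Int.le_induction with
  | base =>
      simp [pvIndexB, pvP, PySem.List.pyRange_one_eq_nil (le_refl (0:Int)),
        PySem.Dict.get?_empty]
  | succ m hm ih =>
      rw [pvIndexB_succ c L m hm, pvP_succ c L m hm s]
      by_cases hs : s = pvSeq c L m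
      · subst hs
        rw [PySem.Dict.get?_insert_self, PySem.Dict.getD_eq_get?_getD, ih]
        by_cases he : pvP c L m (pvSeq c L m) = [] <;> simp [he]
      · rw [PySem.Dict.get?_insert_of_ne _ _ hs, ih]
        have hss : pvSeq c L m ≠ s := fun h => hs h.symm
        simp [hss]

theorem pvIndex_getD (c : String) (L m : Int) (hm : 0 ≤ m) (s : String) :
    (pvIndexB c L m).getD s [] = pvP c L m s := by
  rw [PySem.Dict.getD_eq_get?_getD, pvIndex_get? c L m hm s]
  by_cases he : pvP c L m s = [] <;> simp [he]

-- A's fold: the dict component is B's index, the spacings are the flatMap of prefixes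
theorem pvA_fold (c : String) (L m : Int) (hm : 0 ≤ m) :
    (PySem.List.pyRange 0 m 1).foldl
      (fun (st : List Int × PySem.Dict String (List Int)) i =>
        let seq := PySem.Str.slice c (some i) (some (i + L))
        match st.2.get? seq with
        | some ps => (st.1 ++ ps.map (fun pos => i - pos), st.2.insert seq (ps ++ [i]))
        | none => (st.1, st.2.insert seq [i]))
      ([], PySem.Dict.empty)
    = ((PySem.List.pyRange 0 m 1).flatMap
         (fun i => (pvP c L i (pvSeq c L i)).map (fun pos => i - pos)),
       pvIndexB c L m) := by
  induction m, hm using Int.le_induction with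
  | base =>
      simp [pvIndexB, PySem.List.pyRange_one_eq_nil (le_refl (0:Int))]
  | succ m hm ih =>
      rw [PySem.List.pyRange_one_succ_right hm, List.foldl_append, ih, List.flatMap_append]
      simp only [List.foldl, List.flatMap_cons, List.flatMap_nil, List.append_nil,
        pvSeq_def]
      rw [pvIndex_get? c L m hm (pvSeq c L m), pvIndexB_succ c L m hm,
        pvIndex_getD c L m hm (pvSeq c L m)]
      by_cases he : pvP c L m (pvSeq c L m) = [] <;> simp [he]

-- filtering the full position list below i recovers the prefix position list
theorem pvP_filter (c : String) (L n i : Int) (h0 : 0 ≤ i) (hin : i ≤ n) (s : String) :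
    (pvP c L n s).filter (fun pos => pos < i) = pvP c L i s := by
  unfold pvP
  rw [PySem.List.pyRange_one_append 0 i n h0 hin, List.filter_append, List.filter_append]
  simp only [List.filter_filter]
  have h1 : (PySem.List.pyRange 0 i 1).filter (fun j => decide (j < i) && (pvSeq c L j == s))
      = (PySem.List.pyRange 0 i 1).filter (fun j => pvSeq c L j == s) := by
    apply List.filter_congr
    intro j hj
    have := (PySem.List.mem_pyRange_one.mp hj).2
    simp [this]
  have h2 : (PySem.List.pyRange i n 1).filter (fun j => decide (j < i) && (pvSeq c L j == s))
      = [] := by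
    apply List.filter_eq_nil_iff.mpr
    intro j hj
    have := (PySem.List.mem_pyRange_one.mp hj).1
    simp
    intro h
    omega
  rw [h1, h2, List.append_nil]

-- ===== VERDICT (by name: the statement is the Claim_ definition above) =====
theorem find_repeated_sequences_spacings_spec : Claim_equal_find_repeated_sequences_spacings := by
  intro c L _
  unfold Spec_find_repeated_sequences_spacings find_repeated_sequences_spacings
    find_repeated_sequences_spacings_alt
  set n : Int := (c.length : Int) - L + 1 with hn
  by_cases hpos : 0 ≤ n
  · rw [pvA_fold c L n hpos]
    apply List.flatMap_congr
    intro i hi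
    have h0 : 0 ≤ i := (PySem.List.mem_pyRange_one.mp hi).1
    have hin : i ≤ n := le_of_lt (PySem.List.mem_pyRange_one.mp hi).2
    rw [pvSeq_def, pvIndex_getD c L n hpos (pvSeq c L i),
      pvP_filter c L n i h0 hin (pvSeq c L i)]
  · simp [PySem.List.pyRange_one_eq_nil (show n ≤ (0:Int) by omega)]
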